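-- pv_equiv track=rewrite | github.com/JaelinB/Movie-Data | Proj 8/Proj 8.py | find_max_common_friends
-- ===== SOURCE A (Python) =====
-- def find_common_friends(name1, name2, friends_dict):
--
--     first_n = set(friends_dict[name1]) - set(name2)
--     sec_n = set(friends_dict[name2]) - set(name1)
--
--     com_f = first_n & sec_n
--
--     return com_f
--
-- def find_max_common_friends(friends_dict):
--
--     pair_dict = {}
--     for name, val in friends_dict.items():
--         for name2, val2 in friends_dict.items():
--             if name == name2:
--                 continue
--
--             if name in val2 or name2 in val:
--                 continue
--             reversed_pair = (name2,name)
--             if reversed_pair in pair_dict: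
--                 continue
--
--             common = find_common_friends(name,name2,friends_dict)
--
--             pair_dict[name,name2] = common
--
--     max_val = 0
--     max_pair_list = []
--
--     for pair,lst in pair_dict.items():
--         # check if need to update max_val
--         if len(lst) > max_val:
--             max_pair_list.clear()
--             max_val = len(lst)
--             max_pair_list.append(pair)
--
--         elif len(lst) == max_val:
--             max_pair_list.append(pair)
--
--     max_pair_list.sort()
--
--     return max_pair_list, max_val
-- ===== SOURCE B (Python) =====
-- def find_max_common_friends(friends_dict):
--     people = list(friends_dict.items())
--     best = 0
--     best_pairs = []
--     while people:
--         a, fa = people.pop(0)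
--         sa = set(fa)
--         for b, fb in people:
--             if a in fb or b in fa:
--                 continue
--             n = len((sa & set(fb)) - set(a) - set(b))
--             if n > best:
--                 best = n
--                 best_pairs = [(a, b)]
--             elif n == best:
--                 best_pairs.append((a, b))
--     best_pairs.sort()
--     return best_pairs, best
-- ===== Notes on version B (the rewrite author's own statement) =====
-- stated objective: faster
-- what changed: B replaces A's O(n^2) ordered double loop with reversed-pair dict bookkeeping plus a second max-scan pass by a single triangle sweep (each unordered pair visited once) that keeps a running (best, best_pairs) accumulator, caches the outer friend set, and computes the common count as one intersection-minus-exclusions instead of two per-pair difference sets.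
import Mathlib
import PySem

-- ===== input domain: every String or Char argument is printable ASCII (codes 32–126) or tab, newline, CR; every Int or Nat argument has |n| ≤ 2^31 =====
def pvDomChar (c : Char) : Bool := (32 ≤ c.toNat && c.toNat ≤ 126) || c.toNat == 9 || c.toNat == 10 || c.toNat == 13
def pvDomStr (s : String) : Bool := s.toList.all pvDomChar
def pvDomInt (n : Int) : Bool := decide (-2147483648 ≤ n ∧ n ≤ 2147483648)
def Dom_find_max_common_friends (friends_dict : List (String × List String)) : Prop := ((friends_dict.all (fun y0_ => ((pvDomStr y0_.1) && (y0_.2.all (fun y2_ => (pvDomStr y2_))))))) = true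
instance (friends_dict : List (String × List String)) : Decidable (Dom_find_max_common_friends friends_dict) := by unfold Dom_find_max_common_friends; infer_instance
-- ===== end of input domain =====

-- B replaces A's ordered double loop with pair_dict bookkeeping and a second max pass by a
-- single triangle sweep keeping a running (best, best_pairs); same return value, one pass, no dict.

-- shared helper: Python's set(<string>) is the set of its one-character strings
def pvChars (s : String) : List String := s.toList.map (fun c => String.ofList [c])

-- ===== PORT A =====
-- friends_dict[name] : both call sites pass keys present in the dict, so get?/getD [] is exact here
def find_common_friends (name1 name2 : String) (friends_dict : PySem.Dict String (List String)) : PySem.Set String :=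
  let first_n := PySem.Set.diff (PySem.Set.ofList ((friends_dict.get? name1).getD [])) (PySem.Set.ofList (pvChars name2))
  let sec_n := PySem.Set.diff (PySem.Set.ofList ((friends_dict.get? name2).getD [])) (PySem.Set.ofList (pvChars name1))
  PySem.Set.inter first_n sec_n

-- body of A's inner loop (nv2 = (name2, val2))
def aInnerStep (d : PySem.Dict String (List String)) (name : String) (val : List String)
    (pd : PySem.Dict (String × String) (PySem.Set String)) (nv2 : String × List String) :
    PySem.Dict (String × String) (PySem.Set String) :=
  if name == nv2.1 then pd
  else if nv2.2.contains name || val.contains nv2.1 then pd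
  else if pd.contains (nv2.1, name) then pd
  else pd.insert (name, nv2.1) (find_common_friends name nv2.1 d)

-- body of A's second loop ((max_pair_list, max_val) accumulator)
def aSelStep (acc : List (String × String) × Int) (pl : (String × String) × PySem.Set String) :
    List (String × String) × Int :=
  if PySem.Set.len pl.2 > acc.2 then ([pl.1], PySem.Set.len pl.2)
  else if PySem.Set.len pl.2 == acc.2 then (acc.1 ++ [pl.1], acc.2)
  else acc

def find_max_common_friends (friends_dict : List (String × List String)) : (List (String × String)) × Int :=
  let d := PySem.Dict.ofList friends_dict
  let pair_dict := d.items.foldl (fun pd nv => d.items.foldl (aInnerStep d nv.1 nv.2) pd) PySem.Dict.empty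
  let res := pair_dict.items.foldl aSelStep ([], 0)
  (PySem.List.sorted2 res.1 (fun p => p.1) (fun p => p.2), res.2)

-- ===== PORT B =====
-- body of B's inner loop over the tail of the people list
def bInnerStep (a : String) (fa : List String) (sa : PySem.Set String)
    (st : List (String × String) × Int) (p : String × List String) : List (String × String) × Int :=
  if p.2.contains a || fa.contains p.1 then st
  else
    let n := PySem.Set.len (PySem.Set.diff (PySem.Set.diff (PySem.Set.inter sa (PySem.Set.ofList p.2)) (PySem.Set.ofList (pvChars a))) (PySem.Set.ofList (pvChars p.1)))
    if n > st.2 then ([(a, p.1)], n)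
    else if n == st.2 then (st.1 ++ [(a, p.1)], st.2)
    else st

-- B's while-loop: pop the first person, scan the remaining ones
def bLoop : List (String × List String) → List (String × String) × Int → List (String × String) × Int
  | [], st => st
  | (a, fa) :: people, st => bLoop people (people.foldl (bInnerStep a fa (PySem.Set.ofList fa)) st)

def find_max_common_friends_alt (friends_dict : List (String × List String)) : (List (String × String)) × Int :=
  let people := (PySem.Dict.ofList friends_dict).items
  let res := bLoop people ([], 0)
  (PySem.List.sorted2 res.1 (fun p => p.1) (fun p => p.2), res.2)

-- ===== PRECONDITION & SPEC =====
def Spec_find_max_common_friends (friends_dict : List (String × List String)) (out : (List (String × String)) × Int) : Prop := out = find_max_common_friends_alt friends_dict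
instance (friends_dict : List (String × List String)) (out : (List (String × String)) × Int) : Decidable (Spec_find_max_common_friends friends_dict out) := by unfold Spec_find_max_common_friends; infer_instance

-- ===== CLAIM (what is proved, stated in full; the proofs are below) =====
def Claim_equal_find_max_common_friends : Prop := ∀ (friends_dict : List (String × List String)), Dom_find_max_common_friends friends_dict → Spec_find_max_common_friends friends_dict (find_max_common_friends friends_dict)

-- ===== LEMMAS AND PROOFS =====

-- the pairs A's inner loop records for outer person (a, va) against the people after it
def gPairs (d : PySem.Dict String (List String)) (a : String) (va : List String)
    (rest : List (String × List String)) : List ((String × String) × PySem.Set String) :=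
  rest.filterMap (fun p => if p.2.contains a || va.contains p.1 then none
    else some ((a, p.1), find_common_friends a p.1 d))

-- the whole contents of A's pair_dict, in insertion order
def triPairs (d : PySem.Dict String (List String)) :
    List (String × List String) → List ((String × String) × PySem.Set String)
  | [] => []
  | (a, va) :: rest => gPairs d a va rest ++ triPairs d rest

theorem foldl_fixed_of_mem {α β : Type} (f : β → α → β) (l : List α) (b : β)
    (h : ∀ x ∈ l, f b x = b) : l.foldl f b = b := by
  induction l with
  | nil => rfl
  | cons x xs ih =>
      simp only [List.foldl_cons, h x (by simp)]
      exact ih (fun y hy => h y (by simp [hy]))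

theorem contains_filter {α : Type} [BEq α] [LawfulBEq α] (l : List α) (p : α → Bool) (x : α) :
    (l.filter p).contains x = (l.contains x && p x) := by
  simp [List.mem_filter]

theorem fst_of_mem_gPairs (d : PySem.Dict String (List String)) (a : String) (va : List String)
    (rest : List (String × List String)) (q : (String × String) × PySem.Set String)
    (hq : q ∈ gPairs d a va rest) : q.1.1 = a := by
  simp only [gPairs, List.mem_filterMap] at hq
  obtain ⟨p, _, hq⟩ := hq
  by_cases hc : (p.2.contains a || va.contains p.1) = true
  · rw [if_pos hc] at hq; cases hq
  · rw [if_neg hc] at hq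
    cases hq
    rfl

theorem mem_gPairs_intro (d : PySem.Dict String (List String)) (a : String) (va : List String)
    (rest : List (String × List String)) (p : String × List String) (hp : p ∈ rest)
    (hc : (p.2.contains a || va.contains p.1) = false) :
    ((a, p.1), find_common_friends a p.1 d) ∈ gPairs d a va rest := by
  simp only [gPairs, List.mem_filterMap]
  exact ⟨p, hp, by rw [if_neg (Bool.eq_false_iff.mp hc)]⟩

theorem gPairs_cons_skip (d : PySem.Dict String (List String)) (a : String) (va : List String)
    (p : String × List String) (rest : List (String × List String))
    (hc : (p.2.contains a || va.contains p.1) = true) :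
    gPairs d a va (p :: rest) = gPairs d a va rest := by
  unfold gPairs
  rw [List.filterMap_cons, if_pos hc]

theorem gPairs_cons_keep (d : PySem.Dict String (List String)) (a : String) (va : List String)
    (p : String × List String) (rest : List (String × List String))
    (hc : (p.2.contains a || va.contains p.1) = false) :
    gPairs d a va (p :: rest)
      = ((a, p.1), find_common_friends a p.1 d) :: gPairs d a va rest := by
  unfold gPairs
  rw [List.filterMap_cons, if_neg (Bool.eq_false_iff.mp hc)]

-- B's common-set expression equals A's, as lists
theorem common_eq (d : PySem.Dict String (List String)) (a b : String) (va vb : List String)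
    (ha : d.get? a = some va) (hb : d.get? b = some vb) :
    PySem.Set.diff (PySem.Set.diff (PySem.Set.inter (PySem.Set.ofList va) (PySem.Set.ofList vb))
        (PySem.Set.ofList (pvChars a))) (PySem.Set.ofList (pvChars b))
      = find_common_friends a b d := by
  unfold find_common_friends
  rw [ha, hb]
  simp only [Option.getD_some, PySem.Set.inter, PySem.Set.diff, PySem.Set.contains,
    List.filter_filter]
  refine List.filter_congr ?_
  intro x hx
  rw [contains_filter]
  cases List.contains (PySem.Set.ofList vb) x <;>
    cases List.contains (PySem.Set.ofList (pvChars a)) x <;>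
    cases List.contains (PySem.Set.ofList (pvChars b)) x <;> rfl

-- one inner pass of A over the still-unprocessed suffix appends exactly gPairs
theorem inner_suffix (d : PySem.Dict String (List String)) (a : String) (va : List String) :
    ∀ (S : List (String × List String)) (pd : PySem.Dict (String × String) (PySem.Set String))
      (pre : List ((String × String) × PySem.Set String)),
      pd.items = pre →
      a ∉ S.map Prod.fst → (S.map Prod.fst).Nodup →
      (∀ q ∈ pre, q.1.1 ≠ a → q.1.1 ∉ S.map Prod.fst) →
      (∀ q ∈ pre, q.1.1 = a → q.1.2 ∉ S.map Prod.fst) →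
      (S.foldl (aInnerStep d a va) pd).items = pre ++ gPairs d a va S := by
  intro S
  induction S with
  | nil => intro pd pre hpd _ _ _ _; simpa [gPairs] using hpd
  | cons pb S' ih =>
      intro pd pre hpd ha hnd hA hB
      obtain ⟨b, vb⟩ := pb
      simp only [List.map_cons, List.mem_cons, not_or] at ha
      obtain ⟨hab, haS'⟩ := ha
      simp only [List.map_cons, List.nodup_cons] at hnd
      obtain ⟨hbS', hndS'⟩ := hnd
      have hne1 : ¬ ((a == b) = true) := by simpa using hab
      by_cases hskip : ((vb.contains a || va.contains b) = true)
      · have hstep : aInnerStep d a va pd (b, vb) = pd := by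
          unfold aInnerStep
          rw [if_neg hne1, if_pos hskip]
        rw [List.foldl_cons, hstep,
          ih pd pre hpd haS' hndS'
            (fun q hq hne => fun hmem => hA q hq hne (by simp [hmem]))
            (fun q hq hqa => fun hmem => hB q hq hqa (by simp [hmem])),
          gPairs_cons_skip d a va (b, vb) S' hskip]
      · have hskip' : ((vb.contains a || va.contains b)) = false := Bool.eq_false_iff.mpr hskip
        have hcon : pd.contains (b, a) = false := by
          apply Bool.eq_false_iff.mpr
          intro htrue
          rw [PySem.Dict.contains_iff_mem_keys] at htrue
          simp only [PySem.Dict.keys, hpd, List.mem_map] at htrue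
          obtain ⟨q, hq, hq1⟩ := htrue
          by_cases hqa : q.1.1 = a
          · exact hab (by rw [← hqa, hq1])
          · exact hA q hq hqa (by simp [show q.1.1 = b from by rw [hq1]])
        have hfresh : pd.contains (a, b) = false := by
          apply Bool.eq_false_iff.mpr
          intro htrue
          rw [PySem.Dict.contains_iff_mem_keys] at htrue
          simp only [PySem.Dict.keys, hpd, List.mem_map] at htrue
          obtain ⟨q, hq, hq1⟩ := htrue
          have hqa : q.1.1 = a := by rw [hq1]
          exact hB q hq hqa (by simp [show q.1.2 = b from by rw [hq1]])
        have hstep : aInnerStep d a va pd (b, vb) =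
            pd.insert (a, b) (find_common_friends a b d) := by
          unfold aInnerStep
          rw [if_neg hne1, if_neg hskip, if_neg (by simp [hcon])]
        have hitems' : (pd.insert (a, b) (find_common_friends a b d)).items
            = pre ++ [((a, b), find_common_friends a b d)] := by
          rw [PySem.Dict.items_insert_of_not_contains pd _ hfresh, hpd]
        rw [List.foldl_cons, hstep,
          ih _ (pre ++ [((a, b), find_common_friends a b d)]) hitems' haS' hndS'
            (by
              intro q hq hne
              rcases List.mem_append.mp hq with hq' | hq'
              · exact fun hmem => hA q hq' hne (by simp [hmem])
              · simp at hq'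
                exact absurd (by rw [hq']) hne)
            (by
              intro q hq hqa
              rcases List.mem_append.mp hq with hq' | hq'
              · exact fun hmem => hB q hq' hqa (by simp [hmem])
              · simp at hq'
                rw [hq']
                exact hbS'),
          gPairs_cons_keep d a va (b, vb) S' hskip']
        simp

-- A's outer loop: pair_dict's items are the triangle pairs of the remaining suffix
theorem outer_fold (d : PySem.Dict String (List String)) (L : List (String × List String))
    (hnod : (L.map Prod.fst).Nodup) :
    ∀ (S P : List (String × List String)) (pd : PySem.Dict (String × String) (PySem.Set String))
      (pre : List ((String × String) × PySem.Set String)),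
      L = P ++ S → pd.items = pre →
      (∀ q ∈ pre, q.1.1 ∉ S.map Prod.fst) →
      (∀ pa ∈ S, ∀ pb ∈ L, pb.1 ∉ S.map Prod.fst →
        (pb.2.contains pa.1 || pa.2.contains pb.1) = false →
        (pb.1, pa.1) ∈ pre.map (fun q => q.1)) →
      (S.foldl (fun pd nv => L.foldl (aInnerStep d nv.1 nv.2) pd) pd).items
        = pre ++ triPairs d S := by
  intro S
  induction S with
  | nil => intro P pd pre _ hpd _ _; simpa [triPairs] using hpd
  | cons pa S' ih =>
      intro P pd pre hL hpd h2 h3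
      obtain ⟨a, va⟩ := pa
      have hnodL : ((P ++ (a, va) :: S').map Prod.fst).Nodup := by rw [← hL]; exact hnod
      rw [List.map_append, List.nodup_append] at hnodL
      obtain ⟨hndP, hndS, hdisj⟩ := hnodL
      simp only [List.map_cons, List.nodup_cons] at hndS
      obtain ⟨haS', hndS'⟩ := hndS
      have hmemL : (a, va) ∈ L := by rw [hL]; simp
      -- evaluate the inner fold for outer (a, va)
      have hP : P.foldl (aInnerStep d a va) pd = pd := by
        apply foldl_fixed_of_mem
        intro pb hpb
        have hne : a ≠ pb.1 := by
          intro h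
          exact hdisj pb.1 (List.mem_map_of_mem hpb) a (by simp) (h ▸ rfl)
        have hne1 : ¬ ((a == pb.1) = true) := by simpa using hne
        by_cases hskip : ((pb.2.contains a || va.contains pb.1) = true)
        · unfold aInnerStep
          rw [if_neg hne1, if_pos hskip]
        · have hpbS : pb.1 ∉ ((a, va) :: S').map Prod.fst := by
            intro hmem
            exact hdisj pb.1 (List.mem_map_of_mem hpb) pb.1 hmem rfl
          have hmem := h3 (a, va) (by simp) pb (by rw [hL]; exact List.mem_append_left _ hpb)
            hpbS (Bool.eq_false_iff.mpr hskip)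
          have hcon : pd.contains (pb.1, a) = true := by
            rw [PySem.Dict.contains_iff_mem_keys]
            simpa [PySem.Dict.keys, hpd] using hmem
          unfold aInnerStep
          rw [if_neg hne1, if_neg hskip, if_pos hcon]
      have hself : aInnerStep d a va pd (a, va) = pd := by unfold aInnerStep; simp
      have hin := inner_suffix d a va S' pd pre hpd haS' hndS'
        (fun q hq _ => fun hmem => h2 q hq (by simp [hmem]))
        (fun q hq hqa => absurd (by simp [hqa]) (h2 q hq))
      have hinner : L.foldl (aInnerStep d a va) pd = S'.foldl (aInnerStep d a va) pd := by
        rw [hL, List.foldl_append, List.foldl_cons, hP, hself]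
      -- the new accumulated items
      have hpre' : (S'.foldl (aInnerStep d a va) pd).items = pre ++ gPairs d a va S' := hin
      rw [List.foldl_cons]
      have hL' : L = (P ++ [(a, va)]) ++ S' := by rw [hL]; simp
      rw [show List.foldl (aInnerStep d (a, va).1 (a, va).2) pd L
          = S'.foldl (aInnerStep d a va) pd from hinner]
      rw [ih (P ++ [(a, va)]) _ (pre ++ gPairs d a va S') hL' hpre'
        (by
          intro q hq
          rcases List.mem_append.mp hq with hq' | hq'
          · intro hmem
            exact h2 q hq' (by simp [hmem])
          · intro hmem
            rw [fst_of_mem_gPairs d a va S' q hq'] at hmem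
            exact haS' hmem)
        (by
          intro pa' hpa' pb hpbL hpbS' hcond
          by_cases hpba : pb.1 = a
          · have hpb_eq : pb = (a, va) :=
              List.inj_on_of_nodup_map hnod hpbL hmemL (by simpa using hpba)
            rw [List.map_append, List.mem_append]
            right
            rw [List.mem_map]
            refine ⟨((a, pa'.1), find_common_friends a pa'.1 d), ?_, by rw [hpb_eq]⟩
            refine mem_gPairs_intro d a va S' pa' hpa' ?_
            rw [hpb_eq] at hcond
            simpa [Bool.or_comm] using hcond
          · have hpbS : pb.1 ∉ ((a, va) :: S').map Prod.fst := by
              simpa [hpba] using hpbS'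
            have := h3 pa' (by simp [hpa']) pb hpbL hpbS hcond
            rw [List.map_append, List.mem_append]
            exact Or.inl this)]
      simp [triPairs, List.append_assoc]

-- B's fused loop equals folding A's selection step over the triangle pairs
theorem bLoop_eq (d : PySem.Dict String (List String)) :
    ∀ (M : List (String × List String)) (st : List (String × String) × Int),
      (∀ p ∈ M, d.get? p.1 = some p.2) →
      bLoop M st = (triPairs d M).foldl aSelStep st := by
  intro M
  induction M with
  | nil => intro st _; simp [bLoop, triPairs]
  | cons pa M' ih =>
      intro st hget
      obtain ⟨a, va⟩ := pa
      have hga : d.get? a = some va := hget (a, va) (by simp)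
      have hget' : ∀ p ∈ M', d.get? p.1 = some p.2 := fun p hp => hget p (by simp [hp])
      have hinner : ∀ (R : List (String × List String)), (∀ p ∈ R, d.get? p.1 = some p.2) →
          ∀ st', R.foldl (bInnerStep a va (PySem.Set.ofList va)) st'
            = (gPairs d a va R).foldl aSelStep st' := by
        intro R
        induction R with
        | nil => intro _ st'; simp [gPairs]
        | cons pb R' ihR =>
            intro hR st'
            obtain ⟨b, vb⟩ := pb
            have hRb : d.get? b = some vb := hR (b, vb) (by simp)
            have hR' : ∀ p ∈ R', d.get? p.1 = some p.2 := fun p hp => hR p (by simp [hp])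
            by_cases hskip : (vb.contains a || va.contains b) = true
            · have hstep : bInnerStep a va (PySem.Set.ofList va) st' (b, vb) = st' := by
                unfold bInnerStep; rw [if_pos hskip]
              rw [List.foldl_cons, hstep, ihR hR' st',
                gPairs_cons_skip d a va (b, vb) R' hskip]
            · have hstep : bInnerStep a va (PySem.Set.ofList va) st' (b, vb)
                  = aSelStep st' ((a, b), find_common_friends a b d) := by
                unfold bInnerStep aSelStep
                rw [if_neg hskip, common_eq d a b va vb hga hRb]
              rw [List.foldl_cons, hstep, ihR hR' _,
                gPairs_cons_keep d a va (b, vb) R' (Bool.eq_false_iff.mpr hskip)]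
              rfl
      rw [show bLoop ((a, va) :: M') st
          = bLoop M' (M'.foldl (bInnerStep a va (PySem.Set.ofList va)) st) from rfl]
      rw [ih _ hget', hinner M' hget' st]
      simp [triPairs, List.foldl_append]

-- ===== VERDICT (by name: the statement is the Claim_ definition above) =====
theorem find_max_common_friends_spec : Claim_equal_find_max_common_friends := by
  intro friends_dict _
  unfold Spec_find_max_common_friends
  simp only [find_max_common_friends, find_max_common_friends_alt]
  have hnod : (((PySem.Dict.ofList friends_dict).items).map Prod.fst).Nodup :=
    PySem.Dict.nodup_keys_ofList friends_dict
  have hitems := outer_fold (PySem.Dict.ofList friends_dict)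
    (PySem.Dict.ofList friends_dict).items hnod
    (PySem.Dict.ofList friends_dict).items [] PySem.Dict.empty [] rfl rfl
    (by intro q hq; cases hq) (by intro pa _ pb hpb hnot _; exact absurd (List.mem_map_of_mem hpb) hnot)
  have hget : ∀ p ∈ (PySem.Dict.ofList friends_dict).items,
      (PySem.Dict.ofList friends_dict).get? p.1 = some p.2 := by
    intro p hp
    exact PySem.Dict.get?_of_mem_items _ hp (PySem.Dict.nodup_keys_ofList friends_dict)
  rw [bLoop_eq _ _ _ hget, hitems, List.nil_append]
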